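-- pv_equiv track=rewrite | github.com/jorzaiy/Threadloom | backend/persona_updater.py | _count_consecutive_observed_turns
-- ===== SOURCE A (Python) =====
-- def _turn_pairs(history: list[dict]) -> list[tuple[str, str]]:
--     pairs: list[tuple[str, str]] = []
--     current_user = None
--     for item in history:
--         role = item.get('role')
--         content = item.get('content', '') or ''
--         if role == 'user':
--             current_user = content
--         elif role == 'assistant':
--             pairs.append((current_user or '', content))
--             current_user = None
--     return pairs
--
-- def _count_consecutive_observed_turns(history: list[dict], name: str, aliases: list[str] | None = None) -> int:
--     tokens = [name] + list(aliases or [])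
--     streak = 0
--     for user_text, assistant_text in reversed(_turn_pairs(history)):
--         if any(token and (token in assistant_text or token in user_text) for token in tokens):
--             streak += 1
--             continue
--         break
--     return streak
-- ===== SOURCE B (Python) =====
-- def _count_consecutive_observed_turns(history: list[dict], name: str, aliases: list[str] | None = None) -> int:
--     tokens = [t for t in [name, *(aliases or [])] if t]
--     streak = 0
--     assistant_text = None  # content of the open (not yet finalized) pair's assistant
--     user_text = ''
--     seen_user = False
--     for item in reversed(history):
--         role = item.get('role')
--         content = item.get('content', '') or ''
--         if role == 'assistant':
--             if assistant_text is not None: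
--                 # finalize the later pair now that its preceding assistant is reached
--                 if any(t in assistant_text or t in user_text for t in tokens):
--                     streak += 1
--                 else:
--                     return streak
--             assistant_text = content
--             user_text = ''
--             seen_user = False
--         elif role == 'user' and assistant_text is not None and not seen_user:
--             user_text = content
--             seen_user = True
--     if assistant_text is not None:
--         if any(t in assistant_text or t in user_text for t in tokens):
--             streak += 1
--         else:
--             return streak
--     return streak
-- ===== Notes on version B (the rewrite author's own statement) =====
-- stated objective: alternative
-- what changed: B removes A's intermediate _turn_pairs list entirely: one reversed pass over history with a small state machine (open assistant text, captured user text, seen_user flag) that finalizes each pair's token check when the preceding assistant turn is reached and stops at the first non-match.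
import Mathlib
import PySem

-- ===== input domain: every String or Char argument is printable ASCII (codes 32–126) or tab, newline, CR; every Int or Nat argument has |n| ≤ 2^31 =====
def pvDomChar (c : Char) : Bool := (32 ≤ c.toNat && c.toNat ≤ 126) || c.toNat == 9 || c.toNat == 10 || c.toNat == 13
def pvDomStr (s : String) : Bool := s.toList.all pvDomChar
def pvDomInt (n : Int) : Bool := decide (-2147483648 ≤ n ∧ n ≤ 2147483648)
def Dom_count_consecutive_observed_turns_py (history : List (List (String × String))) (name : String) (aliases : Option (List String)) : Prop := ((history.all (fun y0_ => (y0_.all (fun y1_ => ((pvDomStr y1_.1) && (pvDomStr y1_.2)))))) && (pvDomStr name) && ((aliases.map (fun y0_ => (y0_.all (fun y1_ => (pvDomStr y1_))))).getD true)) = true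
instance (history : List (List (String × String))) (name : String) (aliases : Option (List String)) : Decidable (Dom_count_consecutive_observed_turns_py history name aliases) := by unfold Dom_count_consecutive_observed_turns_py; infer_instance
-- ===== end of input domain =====

-- B replaces A's two-phase "build a pair list, then scan it reversed" with a single reversed
-- state-machine pass over history (objective: simpler/alternative; no intermediate pair list).

-- ===== PORT A =====
-- one step of _turn_pairs' loop: state = (pairs so far, current_user)
def pvStepA (st : List (String × String) × Option String) (item : List (String × String)) : List (String × String) × Option String :=
  let role := (PySem.Dict.mk item).get? "role"
  let content := (PySem.Dict.mk item).getD "content" ""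
  if role = some "user" then (st.1, some content)
  else if role = some "assistant" then (st.1 ++ [(st.2.getD "", content)], none)
  else st

def pvTurnPairs (history : List (List (String × String))) : List (String × String) :=
  (history.foldl pvStepA ([], none)).1

-- the for-loop over reversed(pairs) with its break, as structural recursion
def pvStreakA (tokens : List String) : List (String × String) → Int
  | [] => 0
  | (u, a) :: rest =>
    if tokens.any (fun t => (!(t == "")) && (PySem.Str.isIn t a || PySem.Str.isIn t u))
    then 1 + pvStreakA tokens rest else 0

def count_consecutive_observed_turns_py (history : List (List (String × String))) (name : String) (aliases : Option (List String)) : Int :=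
  let tokens := name :: (aliases.getD [])
  pvStreakA tokens (pvTurnPairs history).reverse

-- ===== PORT B =====
def pvMatchB (tokens : List String) (a u : String) : Bool :=
  tokens.any (fun t => PySem.Str.isIn t a || PySem.Str.isIn t u)

-- single reversed pass; state: open pair's assistant text (none = no pair open yet),
-- its user text, and whether a user was already captured for the open pair
def pvGoB (tokens : List String) : List (List (String × String)) → Option String → String → Bool → Int
  | [], none, _, _ => 0
  | [], some a, u, _ => if pvMatchB tokens a u then 1 else 0
  | item :: rest, aTxt, uTxt, seen =>
    let role := (PySem.Dict.mk item).get? "role"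
    let content := (PySem.Dict.mk item).getD "content" ""
    if role = some "assistant" then
      match aTxt with
      | some a => if pvMatchB tokens a uTxt then 1 + pvGoB tokens rest (some content) "" false else 0
      | none => pvGoB tokens rest (some content) "" false
    else if role = some "user" ∧ aTxt.isSome ∧ seen = false then
      pvGoB tokens rest aTxt content true
    else
      pvGoB tokens rest aTxt uTxt seen

def count_consecutive_observed_turns_py_alt (history : List (List (String × String))) (name : String) (aliases : Option (List String)) : Int :=
  let tokens := (name :: (aliases.getD [])).filter (fun t => !(t == ""))
  pvGoB tokens history.reverse none "" false

-- ===== PRECONDITION & SPEC =====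
def Spec_count_consecutive_observed_turns_py (history : List (List (String × String))) (name : String) (aliases : Option (List String)) (out : Int) : Prop := out = count_consecutive_observed_turns_py_alt history name aliases
instance (history : List (List (String × String))) (name : String) (aliases : Option (List String)) (out : Int) : Decidable (Spec_count_consecutive_observed_turns_py history name aliases out) := by unfold Spec_count_consecutive_observed_turns_py; infer_instance

-- ===== CLAIM (what is proved, stated in full; the proofs are below) =====
def Claim_equal_count_consecutive_observed_turns_py : Prop := ∀ (history : List (List (String × String))) (name : String) (aliases : Option (List String)), Dom_count_consecutive_observed_turns_py history name aliases → Spec_count_consecutive_observed_turns_py history name aliases (count_consecutive_observed_turns_py history name aliases)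

-- ===== LEMMAS AND PROOFS =====

-- A's streak loop, rephrased over the pre-filtered token list (proof helper)
def pvCnt (tokens : List String) : List (String × String) → Int
  | [] => 0
  | (u, a) :: rest => if pvMatchB tokens a u then 1 + pvCnt tokens rest else 0

theorem pvAny_guard (tks : List String) (P : String → Bool) :
    (tks.any fun t => (!(t == "")) && P t) = ((tks.filter (fun t => !(t == ""))).any P) := by
  induction tks with
  | nil => rfl
  | cons t ts ih =>
    cases hb : (t == "") with
    | true =>
      rw [List.any_cons, List.filter_cons, hb]
      simp only [Bool.not_true, Bool.false_and, Bool.false_or, if_neg Bool.false_ne_true]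
      exact ih
    | false =>
      rw [List.any_cons, List.filter_cons, hb]
      simp only [Bool.not_false, Bool.true_and, if_pos trivial, List.any_cons, ih]

theorem pvStreakA_eq_cnt (tks : List String) (ps : List (String × String)) :
    pvStreakA tks ps = pvCnt (tks.filter (fun t => !(t == ""))) ps := by
  induction ps with
  | nil => rfl
  | cons p rest ih =>
    obtain ⟨u, a⟩ := p
    rw [pvStreakA, pvCnt, ih,
      pvAny_guard tks (fun t => PySem.Str.isIn t a || PySem.Str.isIn t u)]
    rfl

-- key invariant: B's single reversed pass computes A's count over the pair list of the
-- not-yet-consumed (earlier) part of the history, plus the open pair's contribution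
theorem pvGoB_inv (tks : List String) (rest : List (List (String × String)))
    (aTxt : Option String) (uTxt : String) (seen : Bool) (hs : seen = false → uTxt = "") :
    pvGoB tks rest aTxt uTxt seen =
      (match aTxt with
       | none => pvCnt tks (rest.reverse.foldl pvStepA ([], none)).1.reverse
       | some a =>
         if pvMatchB tks a (if seen then uTxt else ((rest.reverse.foldl pvStepA ([], none)).2.getD ""))
         then 1 + pvCnt tks (rest.reverse.foldl pvStepA ([], none)).1.reverse else 0) := by
  induction rest generalizing aTxt uTxt seen with
  | nil =>
    cases aTxt with
    | none => rfl
    | some a =>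
      cases seen with
      | false => simp only [pvGoB, hs rfl]; rfl
      | true => rfl
  | cons item rest ih =>
    have hfold : List.foldl pvStepA ([], none) (item :: rest).reverse
        = pvStepA (List.foldl pvStepA ([], none) rest.reverse) item := by
      rw [List.reverse_cons, List.foldl_append]; rfl
    by_cases hA : (PySem.Dict.mk item).get? "role" = some "assistant"
    · have hU : ¬ (PySem.Dict.mk item).get? "role" = some "user" := by rw [hA]; simp
      have hstep : pvStepA (List.foldl pvStepA ([], none) rest.reverse) item
          = ((List.foldl pvStepA ([], none) rest.reverse).1
              ++ [((List.foldl pvStepA ([], none) rest.reverse).2.getD "",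
                   (PySem.Dict.mk item).getD "content" "")], none) := by
        simp only [pvStepA]; rw [if_neg hU, if_pos hA]
      have hcnt : pvCnt tks (List.foldl pvStepA ([], none) (item :: rest).reverse).1.reverse
          = if pvMatchB tks ((PySem.Dict.mk item).getD "content" "")
                ((List.foldl pvStepA ([], none) rest.reverse).2.getD "")
            then 1 + pvCnt tks (List.foldl pvStepA ([], none) rest.reverse).1.reverse else 0 := by
        rw [hfold, hstep]
        simp only [List.reverse_append, List.reverse_cons, List.reverse_nil,
          List.nil_append, List.cons_append, pvCnt]
      cases aTxt with
      | none =>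
        have hgo : pvGoB tks (item :: rest) none uTxt seen
            = pvGoB tks rest (some ((PySem.Dict.mk item).getD "content" "")) "" false := by
          simp only [pvGoB]; rw [if_pos hA]
        rw [hgo, ih _ _ _ (fun _ => rfl)]
        simp only [hcnt, if_neg Bool.false_ne_true]
      | some a =>
        have hgo : pvGoB tks (item :: rest) (some a) uTxt seen
            = if pvMatchB tks a uTxt
              then 1 + pvGoB tks rest (some ((PySem.Dict.mk item).getD "content" "")) "" false
              else 0 := by
          simp only [pvGoB]; rw [if_pos hA]
        have hu : (if seen = true then uTxt
            else ((List.foldl pvStepA ([], none) (item :: rest).reverse).2.getD "")) = uTxt := by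
          cases seen with
          | false => rw [hfold, hstep, hs rfl]; rfl
          | true => rfl
        rw [hgo, ih _ _ _ (fun _ => rfl)]
        simp only [hcnt, hu, if_neg Bool.false_ne_true]
    · by_cases hUr : (PySem.Dict.mk item).get? "role" = some "user"
      · have hstep : pvStepA (List.foldl pvStepA ([], none) rest.reverse) item
            = ((List.foldl pvStepA ([], none) rest.reverse).1,
               some ((PySem.Dict.mk item).getD "content" "")) := by
          simp only [pvStepA]; rw [if_pos hUr]
        cases aTxt with
        | none =>
          have hgo : pvGoB tks (item :: rest) none uTxt seen
              = pvGoB tks rest none uTxt seen := by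
            simp only [pvGoB]; rw [if_neg hA, if_neg (by simp)]
          rw [hgo, ih _ _ _ hs, hfold, hstep]
        | some a =>
          cases seen with
          | false =>
            have hgo : pvGoB tks (item :: rest) (some a) uTxt false
                = pvGoB tks rest (some a) ((PySem.Dict.mk item).getD "content" "") true := by
              simp only [pvGoB]; rw [if_neg hA, if_pos (by refine ⟨hUr, ?_, ?_⟩ <;> simp)]
            rw [hgo, ih _ _ _ (by simp), hfold, hstep]
            rfl
          | true =>
            have hgo : pvGoB tks (item :: rest) (some a) uTxt true
                = pvGoB tks rest (some a) uTxt true := by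
              simp only [pvGoB]; rw [if_neg hA, if_neg (by simp)]
            rw [hgo, ih _ _ _ (by simp), hfold, hstep]
            rfl
      · have hstep : pvStepA (List.foldl pvStepA ([], none) rest.reverse) item
            = List.foldl pvStepA ([], none) rest.reverse := by
          simp only [pvStepA]; rw [if_neg hUr, if_neg hA]
        have hgo : ∀ aT uT sn, pvGoB tks (item :: rest) aT uT sn = pvGoB tks rest aT uT sn := by
          intro aT uT sn
          simp only [pvGoB]; rw [if_neg hA, if_neg (by simp [hUr])]
        cases aTxt with
        | none => rw [hgo, ih _ _ _ hs, hfold, hstep]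
        | some a => rw [hgo, ih _ _ _ hs, hfold, hstep]

-- ===== VERDICT (by name: the statement is the Claim_ definition above) =====
theorem count_consecutive_observed_turns_py_spec : Claim_equal_count_consecutive_observed_turns_py := by
  intro history name aliases _
  unfold Spec_count_consecutive_observed_turns_py
  unfold count_consecutive_observed_turns_py count_consecutive_observed_turns_py_alt
  rw [pvGoB_inv _ _ _ _ _ (fun _ => rfl)]
  simp only [List.reverse_reverse]
  exact (pvStreakA_eq_cnt _ _).symm ▸ rfl
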